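-- pv_equiv track=rewrite | github.com/dulapahv/ProblemSet | Coding_Competency/LeetCode/1309_Decrypt_String_from_Alphabet_to_Integer_Mapping.py | freqAlphabets
-- ===== SOURCE A (Python) =====
-- def freqAlphabets(s: str) -> str:
--     alphamap = dict(zip([str(i) for i in range(1, 10)], [chr(c)
--                     for c in range(ord('a'), ord('i') + 1)]))
--     alphamap2 = dict(zip([f"{i}#" for i in range(10, 27)], [
--                      chr(c) for c in range(ord('j'), ord('z') + 1)]))
--     for symbol in alphamap2:
--         if symbol in s:
--             s = s.replace(symbol, alphamap2.get(symbol))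
--     for symbol in alphamap:
--         if str(symbol) in s:
--             s = s.replace(str(symbol), alphamap.get(symbol))
--     return s
-- ===== SOURCE B (Python) =====
-- def freqAlphabets(s: str) -> str:
--     out = []
--     i = 0
--     while i < len(s):
--         if i + 2 < len(s) and s[i + 2] == '#' and (
--                 (s[i] == '1' and '0' <= s[i + 1] <= '9')
--                 or (s[i] == '2' and '0' <= s[i + 1] <= '6')):
--             out.append(chr(ord('j') + 10 * int(s[i]) + int(s[i + 1]) - 10))
--             i += 3
--         elif '1' <= s[i] <= '9':
--             out.append(chr(ord('a') + int(s[i]) - 1))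
--             i += 1
--         else:
--             out.append(s[i])
--             i += 1
--     return ''.join(out)
-- ===== Notes on version B (the rewrite author's own statement) =====
-- stated objective: simpler
-- what changed: Replaced the 26 sequential global str.replace passes (one per two-digit hash code and one per digit) with a single left-to-right scan that decodes each position once: a valid two-digit code followed by the hash mark becomes one letter j-z, a lone digit 1-9 becomes a-i, and any other character is copied unchanged.
import Mathlib
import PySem

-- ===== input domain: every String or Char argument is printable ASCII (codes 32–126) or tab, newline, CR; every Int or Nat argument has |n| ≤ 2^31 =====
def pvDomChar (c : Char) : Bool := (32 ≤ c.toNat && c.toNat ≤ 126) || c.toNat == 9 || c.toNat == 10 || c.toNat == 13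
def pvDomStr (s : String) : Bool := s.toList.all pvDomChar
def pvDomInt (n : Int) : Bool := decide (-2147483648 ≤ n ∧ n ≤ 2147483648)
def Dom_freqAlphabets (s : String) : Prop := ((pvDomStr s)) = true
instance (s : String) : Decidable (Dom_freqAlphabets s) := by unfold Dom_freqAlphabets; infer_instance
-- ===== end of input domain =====

-- B replaces A's 26 sequential global replace passes by one left-to-right scan that decodes
-- each position once (objective: simpler single-pass decoding; same return value).

-- ===== PORT A =====
-- dict(zip([str(i) for i in range(1,10)], [chr(c) for c in range(ord('a'), ord('i')+1)]))
-- chr(c) has no PySem primitive; ported by hand as String.ofList [Char.ofNat c.toNat] (exact here: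
-- all code points used are < 0xD800).
def pvAlphamap : PySem.Dict String String :=
  PySem.Dict.ofList (List.zip
    ((PySem.List.pyRange 1 10 1).map (fun i => PySem.Int.toStr i))
    ((PySem.List.pyRange 97 106 1).map (fun c => String.ofList [Char.ofNat c.toNat])))

-- dict(zip([f"{i}#" for i in range(10,27)], [chr(c) for c in range(ord('j'), ord('z')+1)]))
def pvAlphamap2 : PySem.Dict String String :=
  PySem.Dict.ofList (List.zip
    ((PySem.List.pyRange 10 27 1).map (fun i => PySem.Int.toStr i ++ "#"))
    ((PySem.List.pyRange 106 123 1).map (fun c => String.ofList [Char.ofNat c.toNat])))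

-- the two 'for symbol in dict: if symbol in s: s = s.replace(symbol, dict.get(symbol))' loops;
-- dict.get(symbol) (always present here) is ported as get? …  |>.getD "".
def freqAlphabets (s : String) : String :=
  let s1 := (PySem.Dict.keys pvAlphamap2).foldl
    (fun acc symbol => if PySem.Str.isIn symbol acc then
        PySem.Str.replace acc symbol ((PySem.Dict.get? pvAlphamap2 symbol).getD "") else acc) s
  (PySem.Dict.keys pvAlphamap).foldl
    (fun acc symbol => if PySem.Str.isIn symbol acc then
        PySem.Str.replace acc symbol ((PySem.Dict.get? pvAlphamap symbol).getD "") else acc) s1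

-- ===== PORT B =====
-- (s[i] == '1' and '0' <= s[i+1] <= '9') or (s[i] == '2' and '0' <= s[i+1] <= '6')
def pvValid (c d : Char) : Bool :=
  (c == '1' && decide ('0' ≤ d) && decide (d ≤ '9')) ||
  (c == '2' && decide ('0' ≤ d) && decide (d ≤ '6'))

-- the single while-loop of Source B, one step per iteration; int(s[i]) on a digit char is toNat - 48
def pvScan : List Char → List Char
  | c :: d :: e :: rest =>
      if e == '#' && pvValid c d then
        Char.ofNat (106 + (10 * (c.toNat - 48) + (d.toNat - 48)) - 10) :: pvScan rest
      else
        (if '1' ≤ c ∧ c ≤ '9' then Char.ofNat (97 + (c.toNat - 48) - 1) else c) ::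
          pvScan (d :: e :: rest)
  | c :: rest =>
      (if '1' ≤ c ∧ c ≤ '9' then Char.ofNat (97 + (c.toNat - 48) - 1) else c) :: pvScan rest
  | [] => []

def freqAlphabets_alt (s : String) : String := String.ofList (pvScan s.toList)

-- ===== PRECONDITION & SPEC =====
def Spec_freqAlphabets (s : String) (out : String) : Prop := out = freqAlphabets_alt s
instance (s : String) (out : String) : Decidable (Spec_freqAlphabets s out) := by unfold Spec_freqAlphabets; infer_instance

-- ===== CLAIM (what is proved, stated in full; the proofs are below) =====
def Claim_equal_freqAlphabets : Prop := ∀ (s : String), Dom_freqAlphabets s → Spec_freqAlphabets s (freqAlphabets s)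

-- ===== LEMMAS AND PROOFS =====

-- structural model of CPython str.replace (leftmost, non-overlapping), for a nonempty pattern
def pvRepl (o n : List Char) : List Char → List Char
  | [] => []
  | c :: t => if o.isPrefixOf (c :: t) then n ++ pvRepl o n (t.drop (o.length - 1))
              else c :: pvRepl o n t
  termination_by l => l.length
  decreasing_by
  all_goals simp

lemma pvGoSpec (o n : List Char) (ho : o ≠ []) :
    ∀ fuel l acc, l.length ≤ fuel →
      PySem.Chars.replace.go o n fuel l acc = acc.reverse ++ pvRepl o n l := by
  intro fuel
  induction fuel with
  | zero =>
    intro l acc h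
    have hl : l = [] := List.eq_nil_of_length_eq_zero (by omega)
    subst hl
    rw [PySem.Chars.replace.go.eq_def]
    simp [pvRepl]
  | succ fuel ih =>
    intro l acc h
    cases l with
    | nil => rw [PySem.Chars.replace.go.eq_def]; simp [pvRepl]
    | cons c t =>
      rw [PySem.Chars.replace.go.eq_def]
      by_cases hp : o.isPrefixOf (c :: t) = true
      · simp only [hp, if_true]
        obtain ⟨a, o', rfl⟩ : ∃ a o', o = a :: o' := by
          cases o with | nil => exact absurd rfl ho | cons a o' => exact ⟨a, o', rfl⟩
        have hlen : (List.drop (a :: o').length (c :: t)).length ≤ fuel := by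
          simp at h ⊢; omega
        rw [ih _ _ hlen]
        have : List.drop (a :: o').length (c :: t) = t.drop ((a :: o').length - 1) := by
          simp [List.drop_succ_cons]
        rw [this]
        simp [pvRepl, hp]
      · simp only [hp, if_false, Bool.false_eq_true]
        rw [ih t (c :: acc) (by simp at h ⊢; omega)]
        simp [pvRepl, hp]

lemma pvReplaceEq (o n l : List Char) (ho : o ≠ []) :
    PySem.Chars.replace l o n = pvRepl o n l := by
  rw [PySem.Chars.replace]
  have : o.isEmpty = false := by cases o with | nil => exact absurd rfl ho | cons a o' => rfl
  rw [this]
  simp only [Bool.false_eq_true, if_false]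
  rw [pvGoSpec o n ho l.length l [] le_rfl]
  simp

lemma pvReplSelf (o n : List Char) (ho : o ≠ []) :
    ∀ l, ¬ o <:+: l → pvRepl o n l = l := by
  intro l
  fun_induction pvRepl o n l with
  | case1 => intro _; rfl
  | case2 c t hp ih =>
    intro h
    exact absurd ((List.isPrefixOf_iff_prefix.mp hp).isInfix) h
  | case3 c t hp ih =>
    intro h
    rw [ih (fun hin => h (hin.trans (List.suffix_cons c t).isInfix))]

lemma pvFoldBridge (ks : List Nat) (key val : Nat → String) :
    ∀ s : String, (∀ k ∈ ks, (key k).toList ≠ []) →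
      (ks.foldl (fun acc k => if PySem.Str.isIn (key k) acc then
          PySem.Str.replace acc (key k) (val k) else acc) s).toList =
        ks.foldl (fun l k => pvRepl (key k).toList (val k).toList l) s.toList := by
  induction ks with
  | nil => intro s _; rfl
  | cons k ks ih =>
    intro s hne
    simp only [List.foldl_cons]
    have hstep : (if PySem.Str.isIn (key k) s then
        PySem.Str.replace s (key k) (val k) else s).toList =
        pvRepl (key k).toList (val k).toList s.toList := by
      by_cases hin : PySem.Str.isIn (key k) s = true
      · rw [if_pos hin, PySem.Str.toList_replace,
          pvReplaceEq _ _ _ (hne k (List.mem_cons_self))]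
      · rw [if_neg hin]
        have hni : ¬ (key k).toList <:+: s.toList := by
          rw [PySem.Str.isIn_eq] at hin
          exact (PySem.Chars.isIn_eq_false_iff _ _).mp (Bool.eq_false_iff.mpr hin)
        rw [pvReplSelf _ _ (hne k (List.mem_cons_self)) _ hni]
    rw [ih _ (fun k' hk' => hne k' (List.mem_cons_of_mem _ hk')), hstep]

lemma pvReplSingle (a b : Char) (l : List Char) :
    pvRepl [a] [b] l = l.map (fun c => if c = a then b else c) := by
  induction l with
  | nil => simp [pvRepl]
  | cons c t ih =>
    by_cases hc : c = a
    · subst hc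
      have hp : [c].isPrefixOf (c :: t) = true := by simp [List.isPrefixOf]
      rw [pvRepl, if_pos hp]
      simp [ih]
    · have hp : ¬ [a].isPrefixOf (c :: t) = true := by
        simp [List.isPrefixOf]; exact fun he => absurd he.symm hc
      rw [pvRepl, if_neg hp]
      simp [ih, hc]

lemma pvMapFold (ks : List Nat) (g : Nat → Char → Char) :
    ∀ l : List Char, ks.foldl (fun acc k => acc.map (g k)) l =
      l.map (fun c => ks.foldl (fun x k => g k x) c) := by
  induction ks with
  | nil => intro l; simp
  | cons k ks ih =>
    intro l
    simp only [List.foldl_cons]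
    rw [ih (l.map (g k)), List.map_map]
    rfl

def pvPat (k : Nat) : List Char := [Char.ofNat (48 + k / 10), Char.ofNat (48 + k % 10), '#']

def pvLtr (k : Nat) : Char := Char.ofNat (96 + k)

def pvSigma (c : Char) : Char :=
  (List.range' 1 9).foldl (fun x k => if x = Char.ofNat (48 + k) then Char.ofNat (96 + k) else x) c

lemma pvCharLe (a b : Char) : a ≤ b ↔ a.toNat ≤ b.toNat := by
  rw [Char.le_def]; exact UInt32.le_iff_toNat_le

lemma pvCharEq (a b : Char) (h : a.toNat = b.toNat) : a = b := by
  have := Char.ofNat_toNat a; rw [h, Char.ofNat_toNat] at this; exact this.symm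

lemma pvOfNatToNat (n : Nat) (h : n < 55296) : (Char.ofNat n).toNat = n := by
  rw [Char.toNat_ofNat, if_pos (Or.inl h)]

lemma pvSigmaNotDigit (c : Char) (h : ¬ (49 ≤ c.toNat ∧ c.toNat ≤ 57)) : pvSigma c = c := by
  have hr : List.range' 1 9 = [1,2,3,4,5,6,7,8,9] := rfl
  rw [pvSigma, hr]
  simp only [List.foldl_cons, List.foldl_nil]
  have hni : ∀ k : Nat, 49 ≤ 48 + k → 48 + k ≤ 57 → ¬ (c = Char.ofNat (48 + k)) := by
    intro k hk1 hk2 he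
    exact h (by rw [he, pvOfNatToNat _ (by omega)]; omega)
  rw [if_neg (hni 1 (by norm_num) (by norm_num)), if_neg (hni 2 (by norm_num) (by norm_num)),
    if_neg (hni 3 (by norm_num) (by norm_num)), if_neg (hni 4 (by norm_num) (by norm_num)),
    if_neg (hni 5 (by norm_num) (by norm_num)), if_neg (hni 6 (by norm_num) (by norm_num)),
    if_neg (hni 7 (by norm_num) (by norm_num)), if_neg (hni 8 (by norm_num) (by norm_num)),
    if_neg (hni 9 (by norm_num) (by norm_num))]

lemma pvSigmaDigit (c : Char) (h1 : 49 ≤ c.toNat) (h2 : c.toNat ≤ 57) :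
    pvSigma c = Char.ofNat (96 + (c.toNat - 48)) := by
  have hc : c = Char.ofNat c.toNat := (Char.ofNat_toNat c).symm
  set m := c.toNat with hm
  rw [hc]
  interval_cases m <;> decide

lemma pvKeys2 : PySem.Dict.keys pvAlphamap2 = (List.range' 10 17).map (fun k => String.ofList (pvPat k)) := by decide

lemma pvKeys1 : PySem.Dict.keys pvAlphamap = (List.range' 1 9).map (fun k => String.ofList [Char.ofNat (48 + k)]) := by decide

lemma pvVal1 : ∀ k ∈ List.range' 1 9,
    ((PySem.Dict.get? pvAlphamap (String.ofList [Char.ofNat (48 + k)])).getD "").toList = [pvLtr k] := by decide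

def pvPhase1 (l : List Char) : List Char :=
  (List.range' 10 17).foldl (fun acc k => pvRepl (pvPat k) [pvLtr k] acc) l

def pvPhase2 (l : List Char) : List Char :=
  (List.range' 1 9).foldl (fun acc k => pvRepl [Char.ofNat (48 + k)] [pvLtr k] acc) l

lemma pvFoldlCongrMem (ks : List Nat) (f g : List Char → Nat → List Char)
    (h : ∀ l k, k ∈ ks → f l k = g l k) : ∀ l, ks.foldl f l = ks.foldl g l := by
  induction ks with
  | nil => intro l; rfl
  | cons k ks ih =>
    intro l
    simp only [List.foldl_cons]
    rw [h l k List.mem_cons_self]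
    exact ih (fun l' k' hk' => h l' k' (List.mem_cons_of_mem _ hk')) _

lemma pvAeq (s : String) : (freqAlphabets s).toList = pvPhase2 (pvPhase1 s.toList) := by
  simp only [freqAlphabets]
  rw [pvKeys1, pvKeys2, List.foldl_map, List.foldl_map]
  rw [pvFoldBridge _ _ _ _ (by intro k hk; simp)]
  rw [pvFoldBridge _ _ _ _ (by intro k hk; simp [pvPat])]
  rw [pvPhase1, pvPhase2]
  rw [pvFoldlCongrMem _ _ (fun acc k => pvRepl [Char.ofNat (48 + k)] [pvLtr k] acc)
    (by intro l k hk; rw [pvVal1 k hk]; simp)]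
  congr 1

lemma pvPhase2Map (l : List Char) : pvPhase2 l = l.map pvSigma := by
  rw [pvPhase2]
  rw [pvFoldlCongrMem _ _
    (fun acc k => acc.map (fun c => if c = Char.ofNat (48 + k) then pvLtr k else c))
    (by intro l k _; exact pvReplSingle _ _ _)]
  rw [pvMapFold]
  rfl

lemma pvCharEqIff (a b : Char) : a = b ↔ a.toNat = b.toNat :=
  ⟨fun h => congrArg _ h, pvCharEq a b⟩

lemma pvValidIff (c d : Char) : pvValid c d = true ↔
    (c.toNat = 49 ∧ 48 ≤ d.toNat ∧ d.toNat ≤ 57) ∨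
    (c.toNat = 50 ∧ 48 ≤ d.toNat ∧ d.toNat ≤ 54) := by
  simp only [pvValid, Bool.or_eq_true, Bool.and_eq_true, beq_iff_eq, decide_eq_true_eq,
    pvCharLe, pvCharEqIff]
  norm_num [show ('1').toNat = 49 from rfl, show ('2').toNat = 50 from rfl,
    show ('0').toNat = 48 from rfl, show ('9').toNat = 57 from rfl,
    show ('6').toNat = 54 from rfl]
  tauto

lemma pvReplSkip1 (a b r c : Char) (t : List Char) (h : a ≠ c) :
    pvRepl [a, b, '#'] [r] (c :: t) = c :: pvRepl [a, b, '#'] [r] t := by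
  rw [pvRepl, if_neg (fun hp =>
    h (List.cons_prefix_cons.mp (List.isPrefixOf_iff_prefix.mp hp)).1)]

lemma pvReplSkip3 (a b r c d : Char) (t : List Char)
    (ha : 48 ≤ a.toNat) (hb : 48 ≤ b.toNat)
    (hne : ¬ (a = c ∧ b = d)) :
    pvRepl [a, b, '#'] [r] (c :: d :: '#' :: t) =
      c :: d :: '#' :: pvRepl [a, b, '#'] [r] t := by
  have h35 : ('#').toNat = 35 := rfl
  rw [pvRepl, if_neg (by
    intro hp
    have := List.isPrefixOf_iff_prefix.mp hp
    rw [List.cons_prefix_cons] at this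
    obtain ⟨h1, this⟩ := this
    rw [List.cons_prefix_cons] at this
    exact hne ⟨h1, this.1⟩)]
  rw [pvRepl, if_neg (by
    intro hp
    have := (List.isPrefixOf_iff_prefix.mp hp)
    rw [List.cons_prefix_cons] at this
    have h2 := (List.cons_prefix_cons.mp this.2).1
    rw [pvCharEqIff, h35] at h2
    omega)]
  rw [pvRepl, if_neg (by
    intro hp
    have := (List.cons_prefix_cons.mp (List.isPrefixOf_iff_prefix.mp hp)).1
    rw [pvCharEqIff, h35] at this
    omega)]

lemma pvFoldPre (F : Nat → List Char → List Char) (ks : List Nat) (π : List Char)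
    (h : ∀ k ∈ ks, ∀ u, F k (π ++ u) = π ++ F k u) :
    ∀ t, ks.foldl (fun acc k => F k acc) (π ++ t) = π ++ ks.foldl (fun acc k => F k acc) t := by
  induction ks with
  | nil => intro t; rfl
  | cons k ks ih =>
    intro t
    simp only [List.foldl_cons]
    rw [h k List.mem_cons_self t]
    exact ih (fun k' hk' => h k' (List.mem_cons_of_mem _ hk')) _

lemma pvPres2 (a b r x : Char) (u : List Char) (hx : x.toNat ≤ 57) (hr : 106 ≤ r.toNat)
    (h : (pvRepl [a, b, '#'] [r] u).take 2 = [x, '#']) : u.take 2 = [x, '#'] := by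
  have h35 : ('#').toNat = 35 := rfl
  cases u with
  | nil => simp [pvRepl] at h
  | cons c1 t1 =>
    rw [pvRepl] at h
    by_cases hp : [a, b, '#'].isPrefixOf (c1 :: t1) = true
    · rw [if_pos hp] at h
      simp only [List.singleton_append, List.take_succ_cons] at h
      have : r = x := (List.cons.injEq _ _ _ _).mp h |>.1
      rw [pvCharEqIff] at this; omega
    · rw [if_neg hp] at h
      simp only [List.take_succ_cons] at h
      obtain ⟨h1, h2⟩ := (List.cons.injEq _ _ _ _).mp h
      cases t1 with
      | nil => simp [pvRepl] at h2
      | cons c2 t2 =>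
        rw [pvRepl] at h2
        by_cases hp2 : [a, b, '#'].isPrefixOf (c2 :: t2) = true
        · rw [if_pos hp2] at h2
          simp only [List.singleton_append, List.take_succ_cons, List.take_zero] at h2
          have : r = '#' := ((List.cons.injEq _ _ _ _).mp h2).1
          rw [pvCharEqIff, h35] at this; omega
        · rw [if_neg hp2] at h2
          simp only [List.take_succ_cons, List.take_zero] at h2
          have : c2 = '#' := ((List.cons.injEq _ _ _ _).mp h2).1
          subst h1; subst this
          rfl

lemma pvFoldKeep (ks : List Nat) (hks : ∀ k ∈ ks, 10 ≤ k ∧ k < 27) (c : Char) :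
    ∀ t, (∀ k ∈ ks, 48 + k / 10 = c.toNat → t.take 2 ≠ [Char.ofNat (48 + k % 10), '#']) →
      ks.foldl (fun acc k => pvRepl (pvPat k) [pvLtr k] acc) (c :: t) =
        c :: ks.foldl (fun acc k => pvRepl (pvPat k) [pvLtr k] acc) t := by
  induction ks with
  | nil => intro t _; rfl
  | cons k ks ih =>
    intro t hno
    have hk := hks k List.mem_cons_self
    simp only [List.foldl_cons]
    have hstep : pvRepl (pvPat k) [pvLtr k] (c :: t) = c :: pvRepl (pvPat k) [pvLtr k] t := by
      by_cases hac : 48 + k / 10 = c.toNat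
      · have hpre : ¬ (pvPat k).isPrefixOf (c :: t) = true := by
          intro hp
          have hpp := List.isPrefixOf_iff_prefix.mp hp
          rw [pvPat, List.cons_prefix_cons] at hpp
          exact hno k List.mem_cons_self hac (List.prefix_iff_eq_take.mp hpp.2).symm
        rw [pvPat] at hpre ⊢
        rw [pvRepl, if_neg hpre]
      · rw [pvPat]
        apply pvReplSkip1
        intro he
        rw [pvCharEqIff, pvOfNatToNat _ (by omega)] at he
        exact hac he
    rw [hstep]
    apply ih (fun k' hk' => hks k' (List.mem_cons_of_mem _ hk'))
    intro k' hk' hac' htk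
    apply hno k' (List.mem_cons_of_mem _ hk') hac'
    have hk'b := hks k' (List.mem_cons_of_mem _ hk')
    have hxle : (Char.ofNat (48 + k' % 10)).toNat ≤ 57 := by
      rw [pvOfNatToNat _ (by omega)]; omega
    have hrge : 106 ≤ (pvLtr k).toNat := by
      rw [pvLtr, pvOfNatToNat _ (by omega)]; omega
    have := pvPres2 (Char.ofNat (48 + k / 10)) (Char.ofNat (48 + k % 10)) (pvLtr k)
      (Char.ofNat (48 + k' % 10)) t hxle hrge
    rw [← pvPat] at this
    exact this htk

def pvDec2 : List Char → List Char
  | c :: d :: e :: rest =>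
      if e == '#' && pvValid c d then
        Char.ofNat (96 + (10 * (c.toNat - 48) + (d.toNat - 48))) :: pvDec2 rest
      else c :: pvDec2 (d :: e :: rest)
  | c :: rest => c :: pvDec2 rest
  | [] => []

lemma pvSingleSigma (c : Char) :
    (if '1' ≤ c ∧ c ≤ '9' then Char.ofNat (97 + (c.toNat - 48) - 1) else c) = pvSigma c := by
  by_cases hd : '1' ≤ c ∧ c ≤ '9'
  · obtain ⟨h1, h2⟩ := hd
    rw [pvCharLe] at h1 h2
    have h1' : 49 ≤ c.toNat := h1
    have h2' : c.toNat ≤ 57 := h2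
    rw [if_pos ⟨by rwa [pvCharLe], by rwa [pvCharLe]⟩, pvSigmaDigit c h1' h2']
    congr 1
    omega
  · rw [if_neg hd, pvSigmaNotDigit]
    intro ⟨h1, h2⟩
    exact hd ⟨by rw [pvCharLe]; exact h1, by rw [pvCharLe]; exact h2⟩

set_option maxHeartbeats 1000000 in
lemma pvScanMap (l : List Char) : pvScan l = (pvDec2 l).map pvSigma := by
  fun_induction pvDec2 l with
  | case1 c d e rest h ih =>
    simp only [pvScan, h, if_true, List.map_cons]
    rw [← ih]
    obtain ⟨-, hv⟩ := Bool.and_eq_true_iff.mp h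
    have hX : 10 ≤ 10 * (c.toNat - 48) + (d.toNat - 48) ∧
        10 * (c.toNat - 48) + (d.toNat - 48) ≤ 26 := by
      rcases (pvValidIff c d).mp hv with ⟨hc, hd1, hd2⟩ | ⟨hc, hd1, hd2⟩ <;> omega
    have hhead : pvSigma (Char.ofNat (96 + (10 * (c.toNat - 48) + (d.toNat - 48)))) =
        Char.ofNat (106 + (10 * (c.toNat - 48) + (d.toNat - 48)) - 10) := by
      rw [pvSigmaNotDigit _ (by rw [pvOfNatToNat _ (by omega)]; omega)]
      exact congrArg Char.ofNat (by omega)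
    rw [hhead]
  | case2 c d e rest h ih =>
    have hb : (e == '#' && pvValid c d) = false := by
      revert h; cases (e == '#' && pvValid c d) <;> simp
    simp only [pvScan, hb, Bool.false_eq_true, if_false, List.map_cons]
    rw [← ih, pvSingleSigma]
  | case3 c rest h ih =>
    simp only [pvScan, List.map_cons]
    rw [← ih, pvSingleSigma]
  | case4 => simp [pvScan]

lemma pvRangeSplit (a k n : Nat) (h1 : a ≤ k) (h2 : k < a + n) :
    List.range' a n = List.range' a (k - a) ++ k :: List.range' (k+1) (a + n - k - 1) := by
  have e2 : a + 1*(k-a) = k := by omega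
  calc List.range' a n = List.range' a ((k-a) + (1+(a+n-k-1))) := by congr 1; omega
    _ = List.range' a (k-a) ++ List.range' (a+1*(k-a)) (1+(a+n-k-1)) := (List.range'_append).symm
    _ = List.range' a (k - a) ++ k :: List.range' (k+1) (a + n - k - 1) := by
        rw [e2, Nat.add_comm 1 (a+n-k-1), List.range'_succ]

lemma pvFoldNil (ks : List Nat) :
    ks.foldl (fun acc k => pvRepl (pvPat k) [pvLtr k] acc) [] = [] := by
  induction ks with
  | nil => rfl
  | cons k ks ih =>
    simp only [List.foldl_cons]
    rw [show pvRepl (pvPat k) [pvLtr k] ([] : List Char) = [] by simp [pvRepl]]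
    exact ih

lemma pvPhase1Eq (l : List Char) : pvPhase1 l = pvDec2 l := by
  fun_induction pvDec2 l with
  | case1 c d e rest h ih =>
    obtain ⟨he, hv⟩ := Bool.and_eq_true_iff.mp h
    have he' : e = '#' := by rwa [beq_iff_eq] at he
    subst he'
    have hcd := (pvValidIff c d).mp hv
    set k0 := 10 * (c.toNat - 48) + (d.toNat - 48) with hk0
    have hb : 10 ≤ k0 ∧ k0 ≤ 26 := by rcases hcd with ⟨h1,h2,h3⟩|⟨h1,h2,h3⟩ <;> omega
    have hdiv : k0 / 10 = c.toNat - 48 := by rcases hcd with ⟨h1,h2,h3⟩|⟨h1,h2,h3⟩ <;> omega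
    have hmod : k0 % 10 = d.toNat - 48 := by rcases hcd with ⟨h1,h2,h3⟩|⟨h1,h2,h3⟩ <;> omega
    have hct : 48 ≤ c.toNat := by rcases hcd with ⟨h1,h2,h3⟩|⟨h1,h2,h3⟩ <;> omega
    have hdt : 48 ≤ d.toNat := by rcases hcd with ⟨h1,h2,h3⟩|⟨h1,h2,h3⟩ <;> omega
    have hpat : pvPat k0 = [c, d, '#'] := by
      rw [pvPat, hdiv, hmod, show 48 + (c.toNat - 48) = c.toNat by omega,
        show 48 + (d.toNat - 48) = d.toNat by omega, Char.ofNat_toNat, Char.ofNat_toNat]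
    have hbef : ∀ k ∈ List.range' 10 (k0 - 10), ∀ u,
        pvRepl (pvPat k) [pvLtr k] ([c, d, '#'] ++ u) =
          [c, d, '#'] ++ pvRepl (pvPat k) [pvLtr k] u := by
      intro k hk u
      rw [List.mem_range'_1] at hk
      rw [pvPat]
      apply pvReplSkip3 _ _ _ _ _ _ (by rw [pvOfNatToNat _ (by omega)]; omega)
        (by rw [pvOfNatToNat _ (by omega)]; omega)
      rintro ⟨hac, hbd⟩
      rw [pvCharEqIff, pvOfNatToNat _ (by omega)] at hac hbd
      omega
    have haft : ∀ k ∈ List.range' (k0+1) (26 - k0), ∀ u,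
        pvRepl (pvPat k) [pvLtr k] ([pvLtr k0] ++ u) =
          [pvLtr k0] ++ pvRepl (pvPat k) [pvLtr k] u := by
      intro k hk u
      rw [List.mem_range'_1] at hk
      rw [pvPat]
      apply pvReplSkip1
      intro hEq
      rw [pvCharEqIff, pvOfNatToNat _ (by omega), pvLtr, pvOfNatToNat _ (by omega)] at hEq
      omega
    have hmid : ∀ u, pvRepl (pvPat k0) [pvLtr k0] ([c, d, '#'] ++ u) =
        [pvLtr k0] ++ pvRepl (pvPat k0) [pvLtr k0] u := by
      intro u
      rw [hpat]
      have hp : [c, d, '#'].isPrefixOf (c :: d :: '#' :: u) = true := by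
        simp [List.isPrefixOf]
      show pvRepl [c,d,'#'] [pvLtr k0] (c :: d :: '#' :: u) = _
      rw [pvRepl, if_pos hp]
      simp
    have hsplit := pvRangeSplit 10 k0 17 (by omega) (by omega)
    rw [show 10 + 17 - k0 - 1 = 26 - k0 by omega] at hsplit
    have hassemble : ∀ t, (List.range' 10 17).foldl
        (fun acc k => pvRepl (pvPat k) [pvLtr k] acc) t =
        (List.range' (k0+1) (26 - k0)).foldl (fun acc k => pvRepl (pvPat k) [pvLtr k] acc)
          (pvRepl (pvPat k0) [pvLtr k0]
            ((List.range' 10 (k0-10)).foldl (fun acc k => pvRepl (pvPat k) [pvLtr k] acc) t)) := by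
      intro t
      rw [hsplit, List.foldl_append, List.foldl_cons]
    rw [pvPhase1, hassemble (c :: d :: '#' :: rest),
      show (c :: d :: '#' :: rest) = [c,d,'#'] ++ rest from rfl,
      pvFoldPre _ _ _ hbef rest, hmid,
      pvFoldPre _ _ _ haft]
    rw [← hassemble rest, ← pvPhase1, ih]
    rw [show [pvLtr k0] ++ pvDec2 rest = pvLtr k0 :: pvDec2 rest from rfl, pvLtr]
  | case2 c d e rest h ih =>
    have hb : (e == '#' && pvValid c d) = false := by
      revert h; cases (e == '#' && pvValid c d) <;> simp
    rw [pvPhase1]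
    rw [pvFoldKeep (List.range' 10 17)
      (by intro k hk; rw [List.mem_range'_1] at hk; omega) c (d :: e :: rest) ?hno]
    · rw [← pvPhase1, ih]
    case hno =>
      intro k hk hac htake
      rw [List.mem_range'_1] at hk
      simp only [List.take_succ_cons, List.take_zero] at htake
      obtain ⟨hd, he⟩ : d = Char.ofNat (48 + k % 10) ∧ e = '#' := by
        have h1 := List.cons_eq_cons.mp htake
        exact ⟨h1.1, (List.cons_eq_cons.mp h1.2).1⟩
      apply absurd hb
      rw [Bool.not_eq_false, Bool.and_eq_true_iff]
      refine ⟨by rw [he]; simp, ?_⟩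
      rw [pvValidIff]
      have hdt : d.toNat = 48 + k % 10 := by rw [hd, pvOfNatToNat _ (by omega)]
      by_cases h10 : k < 20
      · left; omega
      · right; omega
  | case3 c rest h ih =>
    have hlen : rest.length ≤ 1 := by
      rcases rest with _ | ⟨d, _ | ⟨e, r⟩⟩
      · simp
      · simp
      · exact absurd rfl (h d e r)
    rw [pvPhase1, pvFoldKeep (List.range' 10 17)
      (by intro k hk; rw [List.mem_range'_1] at hk; omega) c rest
      (by intro k hk hac htake
          have := congrArg List.length htake
          simp at this
          omega)]
    rw [← pvPhase1, ih]
  | case4 => exact pvFoldNil _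

-- ===== VERDICT (by name: the statement is the Claim_ definition above) =====
theorem freqAlphabets_spec : Claim_equal_freqAlphabets := by
  intro s _
  unfold Spec_freqAlphabets
  apply String.toList_inj.mp
  rw [pvAeq, pvPhase2Map, pvPhase1Eq]
  show _ = (String.ofList (pvScan s.toList)).toList
  rw [pvScanMap, String.toList_ofList]
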